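-- pv_equiv track=rewrite | github.com/tobyoxborrow/adventofcode | 2017/4-entropy-passphrases/4b.py | solve
-- ===== SOURCE A (Python) =====
-- def solve(puzzle_input):
--     valid_count = 0
--     for line in puzzle_input:
--         line = line.strip()
--         if not line:
--             continue
--         tokens = line.split(" ")
--         words = set()
--         is_valid = True
--         for token in tokens:
--             sorted_token = ''.join(sorted([c for c in token]))
--             if sorted_token in words:
--                 is_valid = False
--                 break
--             words.add(sorted_token)
--         if is_valid:
--             valid_count += 1
--     return valid_count
-- ===== SOURCE B (Python) =====
-- def solve(puzzle_input):
--     valid_count = 0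
--     for line in puzzle_input:
--         line = line.strip()
--         if not line:
--             continue
--         keys = sorted(''.join(sorted(t)) for t in line.split(" "))
--         if all(x != y for x, y in zip(keys, keys[1:])):
--             valid_count += 1
--     return valid_count
-- ===== Notes on version B (the rewrite author's own statement) =====
-- stated objective: alternative
-- what changed: B replaces A's incremental hash-set membership check (with early break) by computing all anagram keys for a line, sorting them, and scanning adjacent pairs for a duplicate.
import Mathlib
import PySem

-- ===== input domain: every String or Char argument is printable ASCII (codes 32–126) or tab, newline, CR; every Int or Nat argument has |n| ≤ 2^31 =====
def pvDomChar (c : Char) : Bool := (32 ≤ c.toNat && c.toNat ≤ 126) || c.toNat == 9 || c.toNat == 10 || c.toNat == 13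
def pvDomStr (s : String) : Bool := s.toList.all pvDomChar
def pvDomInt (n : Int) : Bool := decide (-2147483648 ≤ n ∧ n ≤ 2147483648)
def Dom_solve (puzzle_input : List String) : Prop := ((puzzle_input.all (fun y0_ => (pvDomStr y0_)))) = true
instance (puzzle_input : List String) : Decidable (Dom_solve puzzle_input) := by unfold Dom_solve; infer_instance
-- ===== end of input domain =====

-- B counts valid passphrases by sorting each line's anagram keys and scanning adjacent pairs,
-- instead of A's incremental set-membership check with early break. Same return value.

-- ===== PORT A =====
-- ''.join(sorted([c for c in token])) — the key is the sorted character list (join of chars is that string)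
def pvKey (t : List Char) : List Char := PySem.List.sorted t (fun c => c) false

-- the inner 'for token in tokens' loop with its break
def pvCheckTokens : List (List Char) → PySem.Set (List Char) → Bool
  | [], _ => true
  | t :: rest, words =>
    let k := pvKey t
    if PySem.Set.contains words k then false
    else pvCheckTokens rest (PySem.Set.add words k)

def solve (puzzle_input : List String) : Int :=
  puzzle_input.foldl (fun valid_count line =>
    let l := PySem.Chars.strip line.toList
    if l = [] then valid_count
    else
      let tokens := PySem.Chars.splitOn l [' ']
      if pvCheckTokens tokens PySem.Set.empty then valid_count + 1 else valid_count) 0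

-- ===== PORT B =====
-- 'all(x != y for x, y in zip(keys, keys[1:]))' as adjacent-pair recursion (exact)
def pvHasAdjDup : List (List Char) → Bool
  | [] => false
  | [_] => false
  | a :: b :: rest => a == b || pvHasAdjDup (b :: rest)

def solve_alt (puzzle_input : List String) : Int :=
  puzzle_input.foldl (fun valid_count line =>
    let l := PySem.Chars.strip line.toList
    if l = [] then valid_count
    else
      let keys := PySem.List.sorted ((PySem.Chars.splitOn l [' ']).map pvKey) (fun k => k) false
      if pvHasAdjDup keys then valid_count else valid_count + 1) 0

-- ===== PRECONDITION & SPEC =====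
def Spec_solve (puzzle_input : List String) (out : Int) : Prop := out = solve_alt puzzle_input
instance (puzzle_input : List String) (out : Int) : Decidable (Spec_solve puzzle_input out) := by unfold Spec_solve; infer_instance

-- ===== CLAIM (what is proved, stated in full; the proofs are below) =====
def Claim_equal_solve : Prop := ∀ (puzzle_input : List String), Dom_solve puzzle_input → Spec_solve puzzle_input (solve puzzle_input)

-- ===== LEMMAS AND PROOFS =====

theorem pvCheckTokens_iff (ts : List (List Char)) (words : PySem.Set (List Char)) :
    pvCheckTokens ts words = true ↔ (ts.map pvKey).Nodup ∧ ∀ k ∈ ts.map pvKey, k ∉ words := by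
  induction ts generalizing words with
  | nil => simp [pvCheckTokens]
  | cons t rest ih =>
    simp only [pvCheckTokens]
    by_cases h : pvKey t ∈ words
    · have hb : PySem.Set.contains words (pvKey t) = true := by
        simpa [PySem.Set.contains] using h
      simp only [hb, if_true]
      constructor
      · intro hfalse; cases hfalse
      · rintro ⟨-, hmem⟩
        exact absurd h (hmem (pvKey t) (by simp))
    · have hb : ¬ PySem.Set.contains words (pvKey t) = true := by
        simpa [PySem.Set.contains] using h
      rw [if_neg hb, ih]
      simp only [List.map_cons, List.nodup_cons, List.mem_map, List.mem_cons, PySem.Set.mem_add]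
      constructor
      · rintro ⟨hn, hmem⟩
        refine ⟨⟨?_, hn⟩, ?_⟩
        · rintro ⟨x, hx, hkx⟩
          exact (hmem _ ⟨x, hx, rfl⟩) (Or.inr hkx)
        · rintro k (rfl | ⟨x, hx, rfl⟩)
          · exact h
          · exact fun hw => (hmem _ ⟨x, hx, rfl⟩) (Or.inl hw)
      · rintro ⟨⟨hnk, hn⟩, hmem⟩
        refine ⟨hn, ?_⟩
        rintro k ⟨x, hx, rfl⟩
        rintro (hw | heq)
        · exact hmem _ (Or.inr ⟨x, hx, rfl⟩) hw
        · exact hnk ⟨x, hx, heq⟩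

theorem pvHasAdjDup_sorted (l : List (List Char)) (hp : l.Pairwise (fun a b => a ≤ b)) :
    pvHasAdjDup l = false ↔ l.Nodup := by
  induction l with
  | nil => simp [pvHasAdjDup]
  | cons a t ih =>
    cases t with
    | nil => simp [pvHasAdjDup]
    | cons b rest =>
      rcases List.pairwise_cons.mp hp with ⟨hab, hp'⟩
      simp only [pvHasAdjDup, Bool.or_eq_false_iff, beq_eq_false_iff_ne, ne_eq,
        ih hp', List.nodup_cons, List.mem_cons]
      rcases List.pairwise_cons.mp hp' with ⟨hbx, -⟩
      constructor
      · rintro ⟨hne, hnd⟩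
        refine ⟨?_, hnd⟩
        rintro (rfl | hx)
        · exact hne rfl
        · exact hne (le_antisymm (hab b (List.mem_cons_self ..)) (hbx a hx))
      · rintro ⟨hna, hnd⟩
        exact ⟨fun h => hna (Or.inl h), hnd⟩

theorem line_equiv (ts : List (List Char)) :
    pvCheckTokens ts PySem.Set.empty =
      !pvHasAdjDup (PySem.List.sorted (ts.map pvKey) (fun k => k) false) := by
  have h1 : pvCheckTokens ts PySem.Set.empty = true ↔ (ts.map pvKey).Nodup := by
    rw [pvCheckTokens_iff]
    simp [PySem.Set.empty]
  have hinst : (fun (a b : List Char) => a.decidableLT b) = (LinearOrder.toDecidableLT (α := List Char)) :=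
    funext fun a => funext fun b => Subsingleton.elim _ _
  have hperm := PySem.List.sorted_perm (ts.map pvKey) (fun k => k) false
  have hpw := PySem.List.sorted_pairwise (ts.map pvKey) (fun k => k)
  have h2 : pvHasAdjDup (PySem.List.sorted (ts.map pvKey) (fun k => k) false) = false ↔
      (ts.map pvKey).Nodup := by
    rw [hinst] at hperm ⊢
    exact (pvHasAdjDup_sorted _ hpw).trans hperm.nodup_iff
  cases hc : pvCheckTokens ts PySem.Set.empty with
  | true => simp [h2.mpr (h1.mp hc)]
  | false =>
    have hnd : ¬ (ts.map pvKey).Nodup := fun hn => Bool.noConfusion ((h1.mpr hn).symm.trans hc)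
    have : pvHasAdjDup (PySem.List.sorted (ts.map pvKey) (fun k => k) false) = true := by
      cases hd : pvHasAdjDup (PySem.List.sorted (ts.map pvKey) (fun k => k) false) with
      | true => rfl
      | false => exact absurd (h2.mp hd) hnd
    simp [this]

-- ===== VERDICT (by name: the statement is the Claim_ definition above) =====
theorem solve_spec : Claim_equal_solve := by
  intro xs _
  unfold Spec_solve solve solve_alt
  congr 1
  funext c line
  by_cases h : PySem.Chars.strip line.toList = []
  · simp [h]
  · simp only [if_neg h, line_equiv]
    cases pvHasAdjDup (PySem.List.sorted ((PySem.Chars.splitOn (PySem.Chars.strip line.toList) [' ']).map pvKey) (fun k => k) false) <;> simp
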